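-- pv_equiv track=rewrite | github.com/GDragon-creator/bug-free-memory | automated_mediaplayer.py | format_keys
-- ===== SOURCE A (Python) =====
-- def format_keys(keys):
--     special_keys_order = ['ctrl', 'alt', 'shift', 'tab', 'enter']
--     special_keys = []
--     regular_keys = []
--     for key_val in keys:
--         if key_val in special_keys_order:
--             special_keys.append(key_val)
--         else:
--             regular_keys.append(key_val)
--     sorted_special_keys = sorted(special_keys,
--                                  key=lambda x: special_keys_order.index(x) if x in special_keys_order else 999)
--     sorted_regular_keys = sorted(regular_keys)
--     result = sorted_special_keys + sorted_regular_keys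
--     return '+'.join(result)
-- ===== SOURCE B (Python) =====
-- def format_keys(keys):
--     prio = {'ctrl': 0, 'alt': 1, 'shift': 2, 'tab': 3, 'enter': 4}
--     return '+'.join(sorted(keys, key=lambda k: (prio.get(k, 5), k)))
-- ===== Notes on version B (the rewrite author's own statement) =====
-- stated objective: simpler
-- what changed: Replaces A's explicit partition loop, two separate sorts and list concatenation with a single stable sort under one composite key (priority rank, key string) followed by the join.
import Mathlib
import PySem

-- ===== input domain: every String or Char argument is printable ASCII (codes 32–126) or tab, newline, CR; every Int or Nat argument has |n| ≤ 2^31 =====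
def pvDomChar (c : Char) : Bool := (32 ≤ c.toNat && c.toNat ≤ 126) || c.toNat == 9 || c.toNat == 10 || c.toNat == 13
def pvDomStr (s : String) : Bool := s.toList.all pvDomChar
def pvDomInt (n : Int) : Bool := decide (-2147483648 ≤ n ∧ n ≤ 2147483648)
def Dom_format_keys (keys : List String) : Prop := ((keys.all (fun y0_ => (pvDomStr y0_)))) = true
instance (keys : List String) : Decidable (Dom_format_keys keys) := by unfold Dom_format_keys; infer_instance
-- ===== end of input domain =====

-- B replaces A's partition loop + two separate sorts + concatenation by one stable sort
-- under the composite key (priority rank, key string); objective: simpler.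

-- ===== PORT A =====
def fkOrder : List String := ["ctrl", "alt", "shift", "tab", "enter"]

-- A's sort key for the special keys: special_keys_order.index(x) if x in special_keys_order else 999
def fkKeyA (x : String) : Int :=
  if fkOrder.contains x then (((PySem.List.index? fkOrder x).getD 0 : Nat) : Int) else 999

def format_keys (keys : List String) : String :=
  let p := keys.foldl
    (fun (acc : List String × List String) key_val =>
      if fkOrder.contains key_val then (acc.1 ++ [key_val], acc.2) else (acc.1, acc.2 ++ [key_val]))
    ([], [])
  let sorted_special_keys := PySem.List.sorted p.1 fkKeyA
  let sorted_regular_keys := PySem.List.sorted p.2 (fun x => x)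
  PySem.Str.join "+" (sorted_special_keys ++ sorted_regular_keys)

-- ===== PORT B =====
def fkPrio : PySem.Dict String Int :=
  PySem.Dict.mk [("ctrl", 0), ("alt", 1), ("shift", 2), ("tab", 3), ("enter", 4)]

-- B's first key component: prio.get(k, 5)
def fkKeyB (k : String) : Int := fkPrio.getD k 5

def format_keys_alt (keys : List String) : String :=
  PySem.Str.join "+" (PySem.List.sorted2 keys fkKeyB (fun k => k))

-- ===== PRECONDITION & SPEC =====
def Spec_format_keys (keys : List String) (out : String) : Prop := out = format_keys_alt keys
instance (keys : List String) (out : String) : Decidable (Spec_format_keys keys out) := by unfold Spec_format_keys; infer_instance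

-- ===== CLAIM (what is proved, stated in full; the proofs are below) =====
def Claim_equal_format_keys : Prop := ∀ (keys : List String), Dom_format_keys keys → Spec_format_keys keys (format_keys keys)

-- ===== LEMMAS AND PROOFS =====

-- B's comparator, as sorted2 unfolds it
def fkBefore (a b : String) : Bool :=
  decide (fkKeyB a < fkKeyB b) || (!decide (fkKeyB b < fkKeyB a) && decide (a < b))

-- the (non-strict) order both final lists are sorted in
def fkR (a b : String) : Prop := fkBefore a b = true ∨ a = b

theorem fkBefore_iff (a b : String) :
    fkBefore a b = true ↔ (fkKeyB a < fkKeyB b ∨ (¬ fkKeyB b < fkKeyB a ∧ a < b)) := by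
  simp [fkBefore]

theorem fkR_total (a b : String) : fkBefore a b = true ∨ fkBefore b a = true ∨ a = b := by
  rw [fkBefore_iff, fkBefore_iff]
  rcases lt_trichotomy (fkKeyB a) (fkKeyB b) with h | h | h
  · exact Or.inl (Or.inl h)
  · rcases lt_trichotomy a b with g | g | g
    · exact Or.inl (Or.inr ⟨by omega, g⟩)
    · exact Or.inr (Or.inr g)
    · exact Or.inr (Or.inl (Or.inr ⟨by omega, g⟩))
  · exact Or.inr (Or.inl (Or.inl h))

theorem fkR_antisymm (a b : String) (h1 : fkR a b) (h2 : fkR b a) : a = b := by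
  rcases h1 with h1 | h1
  · rcases h2 with h2 | h2
    · rw [fkBefore_iff] at h1 h2
      rcases h1 with h1 | ⟨h1, h1'⟩ <;> rcases h2 with h2 | ⟨h2, h2'⟩
      · omega
      · omega
      · omega
      · exact absurd h1' (lt_asymm h2')
    · exact h2.symm
  · exact h1

theorem fkBefore_trans_R (a b c : String) (h1 : fkBefore a b = true) (h2 : fkR b c) :
    fkBefore a c = true := by
  rcases h2 with h2 | h2
  · rw [fkBefore_iff] at h1 h2 ⊢
    rcases h1 with h1 | ⟨h1, h1'⟩ <;> rcases h2 with h2 | ⟨h2, h2'⟩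
    · exact Or.inl (by omega)
    · exact Or.inl (by omega)
    · exact Or.inl (by omega)
    · exact Or.inr ⟨by omega, lt_trans h1' h2'⟩
  · exact h2 ▸ h1

theorem pairwise_insertBy (x : String) (ys : List String) (h : ys.Pairwise fkR) :
    (PySem.List.insertBy fkBefore x ys).Pairwise fkR := by
  induction ys with
  | nil => simp [PySem.List.insertBy]
  | cons y ys ih =>
    rw [List.pairwise_cons] at h
    by_cases hb : fkBefore x y = true
    · rw [show PySem.List.insertBy fkBefore x (y :: ys) = x :: y :: ys by
        simp [PySem.List.insertBy, hb]]
      refine List.Pairwise.cons ?_ (List.Pairwise.cons h.1 h.2)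
      intro z hz
      rcases List.mem_cons.mp hz with rfl | hz
      · exact Or.inl hb
      · exact Or.inl (fkBefore_trans_R x y z hb (h.1 z hz))
    · rw [show PySem.List.insertBy fkBefore x (y :: ys) =
          y :: PySem.List.insertBy fkBefore x ys by simp [PySem.List.insertBy, hb]]
      refine List.Pairwise.cons ?_ (ih h.2)
      intro z hz
      rcases (PySem.List.mem_insertBy fkBefore x z ys).mp hz with rfl | hz
      · rcases fkR_total y z with g | g | g
        · exact Or.inl g
        · exact absurd g hb
        · exact Or.inr g
      · exact h.1 z hz

theorem pairwise_foldl_insertBy (keys acc : List String) (h : acc.Pairwise fkR) :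
    (keys.foldl (fun a x => PySem.List.insertBy fkBefore x a) acc).Pairwise fkR := by
  induction keys generalizing acc with
  | nil => exact h
  | cons k ks ih => exact ih _ (pairwise_insertBy k acc h)

theorem sorted2_eq_foldl (keys : List String) :
    PySem.List.sorted2 keys fkKeyB (fun k => k) =
      keys.foldl (fun a x => PySem.List.insertBy fkBefore x a) [] := rfl

theorem partition_foldl (keys s r : List String) :
    keys.foldl
      (fun (acc : List String × List String) key_val =>
        if fkOrder.contains key_val then (acc.1 ++ [key_val], acc.2) else (acc.1, acc.2 ++ [key_val]))
      (s, r)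
    = (s ++ keys.filter (fun x => fkOrder.contains x),
       r ++ keys.filter (fun x => !fkOrder.contains x)) := by
  induction keys generalizing s r with
  | nil => simp
  | cons k ks ih =>
    rw [List.foldl_cons]
    cases h : fkOrder.contains k with
    | true =>
      rw [if_pos rfl]
      exact (ih (s ++ [k]) r).trans (by simp [List.filter_cons]; simpa using h)
    | false =>
      rw [if_neg (by simp)]
      exact (ih s (r ++ [k])).trans (by simp [List.filter_cons]; simpa using h)

theorem key_special : ∀ x ∈ fkOrder, fkKeyB x = fkKeyA x ∧ fkKeyA x < 5 := by decide

theorem keyA_inj : ∀ a ∈ fkOrder, ∀ b ∈ fkOrder, fkKeyA a = fkKeyA b → a = b := by decide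

theorem key_nonspecial (x : String) (h : fkOrder.contains x = false) : fkKeyB x = 5 := by
  simp [fkOrder] at h
  obtain ⟨h1, h2, h3, h4, h5⟩ := h
  have g1 : ("ctrl" == x) = false := by simp [Ne.symm h1]
  have g2 : ("alt" == x) = false := by simp [Ne.symm h2]
  have g3 : ("shift" == x) = false := by simp [Ne.symm h3]
  have g4 : ("tab" == x) = false := by simp [Ne.symm h4]
  have g5 : ("enter" == x) = false := by simp [Ne.symm h5]
  simp [fkKeyB, fkPrio, PySem.Dict.getD, PySem.Dict.get?, List.find?, g1, g2, g3, g4, g5]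

theorem mem_of_contains {x : String} (h : fkOrder.contains x = true) : x ∈ fkOrder := by
  simpa using h

theorem pairwise_A (keys : List String) :
    ((PySem.List.sorted (keys.filter (fun x => fkOrder.contains x)) fkKeyA) ++
     (PySem.List.sorted (keys.filter (fun x => !fkOrder.contains x)) (fun x => x))).Pairwise fkR := by
  rw [List.pairwise_append]
  refine ⟨?_, ?_, ?_⟩
  · have hp := PySem.List.sorted_pairwise (keys.filter (fun x => fkOrder.contains x)) fkKeyA
    refine hp.imp_of_mem ?_
    intro a b ha hb hle
    have ha' : a ∈ fkOrder := mem_of_contains (List.of_mem_filter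
      ((PySem.List.mem_sorted _ _ _ _).mp ha))
    have hb' : b ∈ fkOrder := mem_of_contains (List.of_mem_filter
      ((PySem.List.mem_sorted _ _ _ _).mp hb))
    rcases lt_or_eq_of_le hle with hlt | heq
    · refine Or.inl ((fkBefore_iff a b).mpr (Or.inl ?_))
      rw [(key_special a ha').1, (key_special b hb').1]; exact hlt
    · exact Or.inr (keyA_inj a ha' b hb' heq)
  · have hp := PySem.List.sorted_pairwise (keys.filter (fun x => !fkOrder.contains x)) (fun x => x)
    refine hp.imp_of_mem ?_
    intro a b ha hb hle
    have ha' : fkOrder.contains a = false := by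
      simpa using List.of_mem_filter ((PySem.List.mem_sorted _ _ _ _).mp ha)
    have hb' : fkOrder.contains b = false := by
      simpa using List.of_mem_filter ((PySem.List.mem_sorted _ _ _ _).mp hb)
    rcases lt_or_eq_of_le hle with hlt | heq
    · refine Or.inl ((fkBefore_iff a b).mpr (Or.inr ⟨?_, hlt⟩))
      rw [key_nonspecial a ha', key_nonspecial b hb']; omega
    · exact Or.inr heq
  · intro a ha b hb
    have ha' : a ∈ fkOrder := mem_of_contains (List.of_mem_filter
      ((PySem.List.mem_sorted _ _ _ _).mp ha))
    have hb' : fkOrder.contains b = false := by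
      simpa using List.of_mem_filter ((PySem.List.mem_sorted _ _ _ _).mp hb)
    refine Or.inl ((fkBefore_iff a b).mpr (Or.inl ?_))
    have := (key_special a ha')
    rw [this.1, key_nonspecial b hb']; omega

theorem lists_eq (keys : List String) :
    (PySem.List.sorted (keys.filter (fun x => fkOrder.contains x)) fkKeyA) ++
      (PySem.List.sorted (keys.filter (fun x => !fkOrder.contains x)) (fun x => x))
    = PySem.List.sorted2 keys fkKeyB (fun k => k) := by
  have hpermA : ((PySem.List.sorted (keys.filter (fun x => fkOrder.contains x)) fkKeyA) ++
      (PySem.List.sorted (keys.filter (fun x => !fkOrder.contains x)) (fun x => x))).Perm keys :=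
    ((PySem.List.sorted_perm _ _ _).append (PySem.List.sorted_perm _ _ _)).trans
      (List.filter_append_perm _ keys)
  have hpermB := PySem.List.sorted2_perm keys fkKeyB (fun k => k) false
  have hpwB : (PySem.List.sorted2 keys fkKeyB (fun k => k)).Pairwise fkR := by
    rw [sorted2_eq_foldl]
    exact pairwise_foldl_insertBy keys [] (List.Pairwise.nil)
  exact List.Perm.eq_of_pairwise
    (fun a b _ _ h1 h2 => fkR_antisymm a b h1 h2)
    (pairwise_A keys) hpwB (hpermA.trans hpermB.symm)

-- ===== VERDICT (by name: the statement is the Claim_ definition above) =====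
theorem format_keys_spec : Claim_equal_format_keys := by
  intro keys _
  unfold Spec_format_keys format_keys format_keys_alt
  rw [partition_foldl keys [] []]
  simp only [List.nil_append]
  rw [lists_eq keys]
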